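-- pv_equiv track=rewrite | github.com/simonski/aoc | aoc2020_13_part2.py | calculate_offset
-- ===== SOURCE A (Python) =====
-- def calculate_offset(first, last, length):
--     """
--     works out the first index that t (from 0....n)
--     t % first = 0
--     t + length % last = 0
--     """
--     t = 0
--     while True:
--         t1 = t % first
--         t2 = (t+length) % last
--         if (t1 + t2) == 0:
--             return t
--         t += 1
-- ===== SOURCE B (Python) =====
-- def calculate_offset(first, last, length):
--     # Signs of the moduli are irrelevant to divisibility; work with their absolute values.
--     a, b = abs(first), abs(last)
--     # Extended Euclid on (a, b), tracking only the Bezout coefficient of a.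
--     old_r, r = a, b
--     old_x, x = 1, 0
--     while r:
--         q = old_r // r
--         old_r, r = r, old_r - q * r
--         old_x, x = x, old_x - q * x
--     g = old_r                      # gcd(first, last)
--     m = b // g
--     k = (old_x * (-length // g)) % m
--     return a * k
-- ===== Notes on version B (the rewrite author's own statement) =====
-- stated objective: faster
-- what changed: Replaces A's unit-step search over t (checking both remainders each step) with one extended-Euclid run on |first|,|last| that computes a Bezout coefficient and solves the congruence t ≡ 0 (mod first), t ≡ -length (mod last) in closed form.
-- outside the precondition, e.g. on calculate_offset(2, -15, -10): A returns 9, B returns 10; on calculate_offset(4, 6, 1): A does not finish within the time limit, B returns 4; on calculate_offset(0, 3, 0): A raises ZeroDivisionError, B returns 0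
import Mathlib
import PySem

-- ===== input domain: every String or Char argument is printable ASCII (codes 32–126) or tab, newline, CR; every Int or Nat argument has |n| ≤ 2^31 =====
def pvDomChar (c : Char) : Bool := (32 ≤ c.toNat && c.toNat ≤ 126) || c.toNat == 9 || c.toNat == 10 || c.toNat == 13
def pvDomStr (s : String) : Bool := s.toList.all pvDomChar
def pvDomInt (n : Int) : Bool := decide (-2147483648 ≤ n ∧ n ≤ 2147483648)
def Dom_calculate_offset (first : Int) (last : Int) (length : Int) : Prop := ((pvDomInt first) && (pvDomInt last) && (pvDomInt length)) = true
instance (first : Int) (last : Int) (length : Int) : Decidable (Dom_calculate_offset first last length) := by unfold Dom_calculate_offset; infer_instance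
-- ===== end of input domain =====

-- B replaces A's unit-step linear search with a single extended-Euclid run that solves
-- t ≡ 0 (mod first), t + length ≡ 0 (mod last) in closed form (objective: faster).

-- ===== PORT A =====
-- A's 'while True' search, fueled: inside Pre_ the answer is < first*last, so fuel is never exhausted.
def pvLoopA (first : Int) (last : Int) (length : Int) : Nat → Int → Int
  | 0, t => t
  | fuel+1, t =>
    let t1 := PySem.Int.mod t first
    let t2 := PySem.Int.mod (t + length) last
    if t1 + t2 = 0 then t else pvLoopA first last length fuel (t + 1)

def calculate_offset (first : Int) (last : Int) (length : Int) : Int :=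
  pvLoopA first last length ((first * last).natAbs + 1) 0

-- ===== PORT B =====
-- termination of the Euclid loop: the Python-mod remainder shrinks in absolute value
theorem pvRem_natAbs_lt (a b : Int) (hb : b ≠ 0) :
    (a - PySem.Int.floordiv a b * b).natAbs < b.natAbs := by
  have h0 := PySem.Int.floordiv_mul_add_mod a b
  rcases lt_or_gt_of_ne hb with h1 | h1
  · have h2 := PySem.Int.mod_neg_bounds (a := a) h1; omega
  · have h2 := PySem.Int.mod_nonneg (a := a) h1
    have h3 := PySem.Int.mod_lt (a := a) h1; omega

-- the 'while r:' loop of Source B, carrying (old_r, r, old_x, x)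
def pvEgcd (old_r : Int) (r : Int) (old_x : Int) (x : Int) : Int × Int :=
  if h : r = 0 then (old_r, old_x)
  else
    pvEgcd r (old_r - PySem.Int.floordiv old_r r * r) x (old_x - PySem.Int.floordiv old_r r * x)
termination_by r.natAbs
decreasing_by exact pvRem_natAbs_lt old_r r h

def calculate_offset_alt (first : Int) (last : Int) (length : Int) : Int :=
  let a := |first|
  let b := |last|
  let p := pvEgcd a b 1 0
  let g := p.1
  let m := PySem.Int.floordiv b g
  let k := PySem.Int.mod (p.2 * PySem.Int.floordiv (-length) g) m
  a * k

-- ===== PRECONDITION & SPEC =====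
-- Pre_ keeps the function's natural domain: nonzero moduli of equal sign with a solvable
-- congruence. Excluded: first = 0 or last = 0 (A raises ZeroDivisionError), gcd ∤ length
-- (A loops forever), and opposite-sign first/last — a corner where A's stopping rule (the
-- SUM of two sign-of-divisor Python remainders being 0) accidentally accepts cancellations,
-- so any value returned there is an artefact of A's implementation.
def Pre_calculate_offset (first : Int) (last : Int) (length : Int) : Prop :=
  0 < first * last ∧ (Int.gcd first last : Int) ∣ length
instance (first : Int) (last : Int) (length : Int) : Decidable (Pre_calculate_offset first last length) := by
  unfold Pre_calculate_offset; infer_instance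

def pvWitness_calculate_offset : Int × Int × Int := (7, 13, 4)

def Spec_calculate_offset (first : Int) (last : Int) (length : Int) (out : Int) : Prop := out = calculate_offset_alt first last length
instance (first : Int) (last : Int) (length : Int) (out : Int) : Decidable (Spec_calculate_offset first last length out) := by unfold Spec_calculate_offset; infer_instance

-- ===== CLAIM (what is proved, stated in full; the proofs are below) =====
def Claim_equal_calculate_offset : Prop := ∀ (first : Int) (last : Int) (length : Int), Dom_calculate_offset first last length → Pre_calculate_offset first last length → Spec_calculate_offset first last length (calculate_offset first last length)

-- ===== LEMMAS AND PROOFS =====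

theorem pvEgcd_eq_zero (a u v : Int) : pvEgcd a 0 u v = (a, u) := by
  rw [pvEgcd]; exact dif_pos rfl

theorem pvEgcd_eq_else (a b u v : Int) (hb : b ≠ 0) :
    pvEgcd a b u v = pvEgcd b (a - PySem.Int.floordiv a b * b) v (u - PySem.Int.floordiv a b * v) := by
  rw [pvEgcd, dif_neg hb]

-- invariant of the Euclid loop: the result (g, x) has g > 0, |g| = gcd of the inputs,
-- and first·x ≡ g (mod last)
theorem pvEgcd_spec (first last : Int) :
    ∀ (a b u v : Int), 0 < a → 0 ≤ b →
      last ∣ (first * u - a) → last ∣ (first * v - b) →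
      0 < (pvEgcd a b u v).1 ∧
      (pvEgcd a b u v).1.natAbs = Int.gcd a b ∧
      last ∣ (first * (pvEgcd a b u v).2 - (pvEgcd a b u v).1) := by
  intro a b u v
  induction a, b, u, v using pvEgcd.induct with
  | case1 a u v =>
    intro ha _ hu _
    rw [pvEgcd_eq_zero]
    refine ⟨ha, ?_, hu⟩
    rw [Int.gcd_zero_right]
  | case2 a b u v hb ih =>
    intro ha hb0 hu hv
    have hbpos : 0 < b := lt_of_le_of_ne hb0 (Ne.symm hb)
    rw [pvEgcd_eq_else a b u v hb]
    have hrem0 : 0 ≤ a - PySem.Int.floordiv a b * b := by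
      have h0 := PySem.Int.floordiv_mul_add_mod a b
      have h2 := PySem.Int.mod_nonneg (a := a) hbpos
      linarith
    have hdvd : last ∣ (first * (u - PySem.Int.floordiv a b * v) - (a - PySem.Int.floordiv a b * b)) := by
      have h := dvd_sub hu (Dvd.dvd.mul_left hv (PySem.Int.floordiv a b))
      have e : first * (u - PySem.Int.floordiv a b * v) - (a - PySem.Int.floordiv a b * b)
          = (first * u - a) - PySem.Int.floordiv a b * (first * v - b) := by ring
      rw [e]; exact h
    obtain ⟨h1, h2, h3⟩ := ih hbpos hrem0 hv hdvd
    refine ⟨h1, ?_, h3⟩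
    rw [h2, show a - PySem.Int.floordiv a b * b = a + b * (-(PySem.Int.floordiv a b)) from by ring,
        Int.gcd_add_mul_left_right, Int.gcd_comm]

-- the stopping condition of A's loop is, for same-sign moduli, exactly the pair of divisibilities
theorem pvCond_iff (first last length t : Int) (hs : 0 < first * last) :
    PySem.Int.mod t first + PySem.Int.mod (t + length) last = 0 ↔
    (first ∣ t ∧ last ∣ (t + length)) := by
  rw [← PySem.Int.mod_eq_zero_iff_dvd, ← PySem.Int.mod_eq_zero_iff_dvd]
  rcases mul_pos_iff.mp hs with ⟨h1, h2⟩ | ⟨h1, h2⟩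
  · have b1 := PySem.Int.mod_nonneg (a := t) h1
    have b2 := PySem.Int.mod_nonneg (a := t + length) h2
    omega
  · have b1 := PySem.Int.mod_neg_bounds (a := t) h1
    have b2 := PySem.Int.mod_neg_bounds (a := t + length) h2
    omega

-- closed-form properties of B's answer: nonnegative, below lcm(first,last) ≤ |first·last|,
-- and it solves both congruences
theorem pvAlt_props (first last length : Int)
    (hs : 0 < first * last) (hd : (Int.gcd first last : Int) ∣ length) :
    0 ≤ calculate_offset_alt first last length ∧
    calculate_offset_alt first last length < (Int.lcm first last : Int) ∧
    (Int.lcm first last : Int) ≤ ((first * last).natAbs : Int) ∧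
    first ∣ calculate_offset_alt first last length ∧
    last ∣ (calculate_offset_alt first last length + length) := by
  have hf0 : first ≠ 0 := by rintro rfl; simp at hs
  have hl0 : last ≠ 0 := by rintro rfl; simp at hs
  have hF : 1 ≤ |first| := Int.one_le_abs hf0
  have hL : 1 ≤ |last| := Int.one_le_abs hl0
  have hgabs : (Int.gcd |first| |last| : Int) = (Int.gcd first last : Int) := by
    simp [Int.gcd, Int.natAbs_abs]
  have hlabs : (Int.lcm |first| |last| : Int) = (Int.lcm first last : Int) := by
    simp [Int.lcm, Int.natAbs_abs]
  have hd' : (Int.gcd |first| |last| : Int) ∣ length := by rw [hgabs]; exact hd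
  obtain ⟨hg1, hg2, hg3⟩ := pvEgcd_spec |first| |last| |first| |last| 1 0 (by omega) (by omega)
      ⟨0, by ring⟩ ⟨-1, by ring⟩
  have hgeq : (pvEgcd |first| |last| 1 0).1 = (Int.gcd |first| |last| : Int) := by omega
  set g : Int := (Int.gcd |first| |last| : Int) with hgdef
  have hg0 : 0 < g := by omega
  have hgf : g ∣ |first| := by rw [hgdef]; exact Int.gcd_dvd_left |first| |last|
  have hgl : g ∣ |last| := by rw [hgdef]; exact Int.gcd_dvd_right |first| |last|
  have hmdef : PySem.Int.floordiv |last| g = |last| / g := PySem.Int.floordiv_eq_ediv_of_pos hg0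
  have hm : |last| / g * g = |last| := Int.ediv_mul_cancel hgl
  have hm0 : 0 < |last| / g := by nlinarith
  have hfddef : PySem.Int.floordiv (-length) g = (-length) / g := PySem.Int.floordiv_eq_ediv_of_pos hg0
  have hfd : (-length) / g * g = -length := Int.ediv_mul_cancel (dvd_neg.mpr hd')
  have haltdef : calculate_offset_alt first last length
      = |first| * PySem.Int.mod ((pvEgcd |first| |last| 1 0).2 * ((-length) / g)) (|last| / g) := by
    simp only [calculate_offset_alt]
    rw [hgeq, hmdef, hfddef]
  have hk0 : 0 ≤ PySem.Int.mod ((pvEgcd |first| |last| 1 0).2 * ((-length) / g)) (|last| / g) :=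
    PySem.Int.mod_nonneg (a := (pvEgcd |first| |last| 1 0).2 * ((-length) / g)) hm0
  have hkm : PySem.Int.mod ((pvEgcd |first| |last| 1 0).2 * ((-length) / g)) (|last| / g) < |last| / g :=
    PySem.Int.mod_lt (a := (pvEgcd |first| |last| 1 0).2 * ((-length) / g)) hm0
  have hq' := PySem.Int.floordiv_mul_add_mod ((pvEgcd |first| |last| 1 0).2 * ((-length) / g)) (|last| / g)
  -- lcm facts
  have hNat : Int.gcd |first| |last| * Int.lcm |first| |last| = (|first|).natAbs * (|last|).natAbs :=
    Nat.gcd_mul_lcm _ _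
  have hcast1 : ((|first|).natAbs : Int) = |first| := Int.natAbs_of_nonneg (by omega)
  have hcast2 : ((|last|).natAbs : Int) = |last| := Int.natAbs_of_nonneg (by omega)
  have hlcm : g * (Int.lcm |first| |last| : Int) = |first| * |last| := by
    have h1 : ((Int.gcd |first| |last| : Nat) : Int) * ((Int.lcm |first| |last| : Nat) : Int)
        = ((|first|).natAbs : Int) * ((|last|).natAbs : Int) := by exact_mod_cast congrArg Nat.cast hNat
    rw [hcast1, hcast2] at h1
    exact h1
  have hlcm2 : (Int.lcm |first| |last| : Int) = |first| * (|last| / g) := by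
    have h2 : g * (|first| * (|last| / g)) = |first| * |last| := by
      calc g * (|first| * (|last| / g)) = |first| * (|last| / g * g) := by ring
        _ = |first| * |last| := by rw [hm]
    exact mul_left_cancel₀ (by omega) (hlcm.trans h2.symm)
  have hFL : ((first * last).natAbs : Int) = |first| * |last| := by
    rw [← abs_mul]; exact (Int.abs_eq_natAbs _).symm
  refine ⟨?_, ?_, ?_, ?_, ?_⟩
  · rw [haltdef]; exact mul_nonneg (by omega) hk0
  · rw [haltdef, ← hlabs, hlcm2]; exact mul_lt_mul_of_pos_left hkm (by omega)
  · rw [← hlabs, hlcm2, hFL]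
    have hle : |last| / g ≤ |last| := Int.ediv_le_self g (by omega)
    nlinarith
  · refine (abs_dvd _ _).mp ?_
    rw [haltdef]; exact dvd_mul_right _ _
  · refine (abs_dvd _ _).mp ?_
    rw [haltdef]
    have e2 : |first| * PySem.Int.mod ((pvEgcd |first| |last| 1 0).2 * ((-length) / g)) (|last| / g) + length
        = (|first| * ((pvEgcd |first| |last| 1 0).2 * ((-length) / g)) + length)
          - PySem.Int.floordiv ((pvEgcd |first| |last| 1 0).2 * ((-length) / g)) (|last| / g) * (|first| * (|last| / g)) := by
      linear_combination |first| * hq'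
    rw [e2]
    have hd1 : |last| ∣ (|first| * ((pvEgcd |first| |last| 1 0).2 * ((-length) / g)) + length) := by
      have e : |first| * ((pvEgcd |first| |last| 1 0).2 * ((-length) / g)) + length
          = ((-length) / g) * (|first| * (pvEgcd |first| |last| 1 0).2 - g) := by
        linear_combination hfd
      rw [e]
      exact Dvd.dvd.mul_left (hgeq ▸ hg3) _
    have hd2 : |last| ∣ |first| * (|last| / g) := by
      obtain ⟨f', hf'⟩ := hgf
      exact ⟨f', by rw [hf']; linear_combination f' * hm⟩
    exact dvd_sub hd1 (Dvd.dvd.mul_left hd2 _)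

-- A's fueled search reaches the unique minimal solution
theorem pvLoop_reaches (first last length N : Int)
    (hs : 0 < first * last)
    (h1 : first ∣ N) (h2 : last ∣ (N + length))
    (hmin : ∀ t : Int, 0 ≤ t → t < N → ¬(first ∣ t ∧ last ∣ (t + length))) :
    ∀ (fuel : Nat) (t : Int), 0 ≤ t → t ≤ N → N - t < fuel →
      pvLoopA first last length fuel t = N := by
  intro fuel
  induction fuel with
  | zero => intro t h3 h4 h5; simp at h5; omega
  | succ n ih =>
    intro t h3 h4 h5
    simp only [pvLoopA]
    by_cases hc : PySem.Int.mod t first + PySem.Int.mod (t + length) last = 0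
    · rw [if_pos hc]
      rcases (pvCond_iff first last length t hs).mp hc with ⟨hd1, hd2⟩
      by_contra hne
      exact hmin t h3 (lt_of_le_of_ne h4 hne) ⟨hd1, hd2⟩
    · rw [if_neg hc]
      have htN : t ≠ N := by
        rintro rfl
        exact hc ((pvCond_iff first last length t hs).mpr ⟨h1, h2⟩)
      refine ih (t + 1) (by omega) (by omega) ?_
      push_cast at h5 ⊢
      omega

-- ===== VERDICT (by name: the statement is the Claim_ definition above) =====
theorem calculate_offset_spec : Claim_equal_calculate_offset := by
  unfold Claim_equal_calculate_offset
  intro first last length _ hpre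
  obtain ⟨hs, hd⟩ := hpre
  obtain ⟨ha0, halcm, hlcmle, hadvd1, hadvd2⟩ := pvAlt_props first last length hs hd
  have hmin : ∀ t : Int, 0 ≤ t → t < calculate_offset_alt first last length →
      ¬(first ∣ t ∧ last ∣ (t + length)) := by
    rintro t ht0 htN ⟨hdd1, hdd2⟩
    have hddN1 : first ∣ (calculate_offset_alt first last length - t) := dvd_sub hadvd1 hdd1
    have hddN2 : last ∣ (calculate_offset_alt first last length - t) := by
      have e : calculate_offset_alt first last length - t
          = (calculate_offset_alt first last length + length) - (t + length) := by ring
      rw [e]; exact dvd_sub hadvd2 hdd2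
    have hlcmdvd := Int.coe_lcm_dvd hddN1 hddN2
    have := Int.le_of_dvd (by omega) hlcmdvd
    omega
  have hfuel : calculate_offset_alt first last length - 0 < (((first * last).natAbs + 1 : Nat) : Int) := by
    have h1 : calculate_offset_alt first last length < ((first * last).natAbs : Int) :=
      lt_of_lt_of_le halcm hlcmle
    generalize hP : first * last = P at h1 ⊢
    omega
  unfold Spec_calculate_offset calculate_offset
  exact pvLoop_reaches first last length _ hs hadvd1 hadvd2 hmin _ 0 le_rfl ha0 hfuel
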